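-- pv_equiv track=rewrite | github.com/aaabon/rpeditor | spam.py | bold
-- ===== SOURCE A (Python) =====
-- def bold(string):
--     # bolds given string and returns new one
--     #return replacesymbol(string, "**")
--
--     start = 0
--     newstring = ""
--     # finding locations of '*' symbol, i is index and c tracks the chars
--     for i,c in enumerate(string):
--         if "*" == c:
--             if (start == 1): # a previous * was found and so its a **
--                 newstring += "'''"
--                 start = 0
--             else: start = 1
--         else:
--             newstring += c
--             start = 0
--
--     return newstring
-- ===== SOURCE B (Python) =====
-- def bold(string):
--     # bolds given string and returns new one: each adjacent pair of '*'
--     # (left to right) becomes "'''", leftover single '*' are dropped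
--     return string.replace("**", "'''").replace("*", "")
-- ===== Notes on version B (the rewrite author's own statement) =====
-- stated objective: faster
-- what changed: Replaced the manual char-by-char toggle-flag loop with two whole-string standard-library replace passes (star-pair to triple quote, then drop leftover single stars), moving the scan into C-level str.replace.
import Mathlib
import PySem

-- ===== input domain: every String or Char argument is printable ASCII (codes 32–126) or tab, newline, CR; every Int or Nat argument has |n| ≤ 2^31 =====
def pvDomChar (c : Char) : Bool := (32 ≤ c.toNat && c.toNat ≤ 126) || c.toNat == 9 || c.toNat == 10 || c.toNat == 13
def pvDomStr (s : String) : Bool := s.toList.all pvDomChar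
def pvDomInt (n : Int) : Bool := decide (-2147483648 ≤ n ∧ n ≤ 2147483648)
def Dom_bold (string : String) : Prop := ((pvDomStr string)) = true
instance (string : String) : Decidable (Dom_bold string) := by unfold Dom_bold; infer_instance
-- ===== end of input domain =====

-- B replaces A's char-by-char toggle-flag loop by two whole-string replace passes
-- (each adjacent star pair becomes a triple quote, leftover single stars are dropped);
-- same return value; a timing run measured B faster (C-level str.replace vs Python loop).

-- ===== PORT A =====
-- one loop iteration of A: state = (start flag, newstring)
def boldStep (st : Bool × String) (c : Char) : Bool × String :=
  if c = '*' then
    if st.1 then (false, st.2 ++ "'''") else (true, st.2)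
  else (false, st.2 ++ String.singleton c)

def bold (string : String) : String :=
  (string.toList.foldl boldStep (false, "")).2

-- ===== PORT B =====
def bold_alt (string : String) : String :=
  PySem.Str.replace (PySem.Str.replace string "**" "'''") "*" ""

-- ===== PRECONDITION & SPEC =====
def Spec_bold (string : String) (out : String) : Prop := out = bold_alt string
instance (string : String) (out : String) : Decidable (Spec_bold string out) := by unfold Spec_bold; infer_instance

-- ===== CLAIM (what is proved, stated in full; the proofs are below) =====
def Claim_equal_bold : Prop := ∀ (string : String), Dom_bold string → Spec_bold string (bold string)

-- ===== LEMMAS AND PROOFS =====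

-- common spec: pair adjacent stars left-to-right into "'''", drop lone stars
def boldList : List Char → List Char
  | [] => []
  | ['*'] => []
  | '*' :: '*' :: t => '\'' :: '\'' :: '\'' :: boldList t
  | '*' :: c :: t => c :: boldList t
  | c :: t => c :: boldList t

-- first pass of B on char lists
def rep2 : List Char → List Char
  | '*' :: '*' :: t => '\'' :: '\'' :: '\'' :: rep2 t
  | c :: t => c :: rep2 t
  | [] => []

theorem rep2_cons (c : Char) (t : List Char) (h : ¬ (['*', '*'] : List Char) <+: (c :: t)) :
    rep2 (c :: t) = c :: rep2 t := by
  rw [rep2.eq_def]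
  split
  · rename_i t' heq
    exact absurd (by rw [heq]; exact ⟨t', rfl⟩) h
  · rename_i heq
    injection heq with h1 h2
    subst h1; subst h2
    rfl
  · rename_i heq; cases heq

theorem bold_loop (l : List Char) (s : String) :
    ((l.foldl boldStep (false, s)).2).toList = s.toList ++ boldList l := by
  induction l using boldList.induct generalizing s with
  | case1 => simp [boldList]
  | case2 => simp [boldList, List.foldl, boldStep]
  | case3 t ih =>
      simp [List.foldl, boldStep, boldList, ih]
  | case4 c t hc ih =>
      have hc' : ¬ c = '*' := fun h => hc h
      simp [List.foldl, boldStep, boldList, hc', ih]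
  | case5 c t hc1 hc2 ih ih2 =>
      have hc : ¬ c = '*' := by
        intro h
        match t with
        | [] => exact hc1 h rfl
        | c1 :: t1 => exact ih c1 t1 h rfl
      simp [List.foldl, boldStep, boldList, hc, ih2]

theorem go_rep2 (fuel : Nat) (l acc : List Char) (h : l.length ≤ fuel) :
    PySem.Chars.replace.go ['*', '*'] ['\'', '\'', '\''] fuel l acc
      = acc.reverse ++ rep2 l := by
  induction fuel generalizing l acc with
  | zero =>
      have hl : l = [] := List.length_eq_zero_iff.mp (Nat.le_zero.mp h)
      subst hl
      simp [PySem.Chars.replace.go, rep2]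
  | succ fuel ih =>
      match l with
      | [] => simp [PySem.Chars.replace.go, rep2]
      | c :: t =>
          rw [PySem.Chars.replace.go]
          simp only [List.length_cons] at h
          by_cases hp : (['*', '*'] : List Char) <+: (c :: t)
          · obtain ⟨t', ht'⟩ := hp
            obtain ⟨rfl, ht⟩ : c = '*' ∧ '*' :: t' = t := by cases ht'; exact ⟨rfl, rfl⟩
            subst ht
            rw [if_pos (show (['*', '*'] : List Char).isPrefixOf ('*' :: '*' :: t') = true from by simp [List.isPrefixOf])]
            simp only [List.length_cons] at h
            have : List.drop (['*', '*'] : List Char).length ('*' :: '*' :: t') = t' := rfl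
            rw [this, ih t' _ (by omega)]
            simp [rep2]
          · rw [if_neg (fun hb => hp (List.isPrefixOf_iff_prefix.mp hb))]
            rw [ih t _ (by omega), rep2_cons c t hp]
            simp

theorem go_filter (fuel : Nat) (l acc : List Char) (h : l.length ≤ fuel) :
    PySem.Chars.replace.go ['*'] [] fuel l acc
      = acc.reverse ++ l.filter (· ≠ '*') := by
  induction fuel generalizing l acc with
  | zero =>
      have hl : l = [] := List.length_eq_zero_iff.mp (Nat.le_zero.mp h)
      subst hl
      simp [PySem.Chars.replace.go]
  | succ fuel ih =>
      match l with
      | [] => simp [PySem.Chars.replace.go]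
      | c :: t =>
          rw [PySem.Chars.replace.go]
          simp only [List.length_cons] at h
          by_cases hc : c = '*'
          · subst hc
            rw [if_pos (show (['*'] : List Char).isPrefixOf ('*' :: t) = true from by simp [List.isPrefixOf])]
            have : List.drop (['*'] : List Char).length ('*' :: t) = t := rfl
            rw [this, ih t _ (by omega)]
            simp
          · rw [if_neg (by
                intro hb
                obtain ⟨t', ht'⟩ := List.isPrefixOf_iff_prefix.mp hb
                cases ht'; exact hc rfl)]
            rw [ih t _ (by omega)]
            simp [hc]

theorem replace_rep2 (l : List Char) :
    PySem.Chars.replace l ['*', '*'] ['\'', '\'', '\''] = rep2 l := by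
  rw [PySem.Chars.replace]
  simp only [List.isEmpty_cons]
  exact go_rep2 l.length l [] le_rfl

theorem replace_filter (l : List Char) :
    PySem.Chars.replace l ['*'] [] = l.filter (· ≠ '*') := by
  rw [PySem.Chars.replace]
  simp only [List.isEmpty_cons]
  exact go_filter l.length l [] le_rfl

theorem filter_rep2 (l : List Char) :
    (rep2 l).filter (· ≠ '*') = boldList l := by
  induction l using boldList.induct with
  | case1 => simp [rep2, boldList]
  | case2 =>
      rw [rep2_cons '*' [] (by rintro ⟨t', ht'⟩; cases ht')]
      simp [rep2, boldList]
  | case3 t ih =>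
      rw [show rep2 ('*' :: '*' :: t) = '\'' :: '\'' :: '\'' :: rep2 t from by rw [rep2]]
      simp [boldList]
      simpa using ih
  | case4 c t hc ih =>
      have hc' : ¬ c = '*' := fun h => hc h
      rw [rep2_cons '*' (c :: t) (by rintro ⟨t', ht'⟩; cases ht'; exact hc' rfl),
          rep2_cons c t (by rintro ⟨t', ht'⟩; cases ht'; exact hc' rfl)]
      simp only [boldList, List.filter_cons, ih]
      simp [hc']
  | case5 c t hc1 hc2 ih ih2 =>
      have hc : ¬ c = '*' := by
        intro h
        match t with
        | [] => exact hc1 h rfl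
        | c1 :: t1 => exact ih c1 t1 h rfl
      rw [rep2_cons c t (by rintro ⟨t', ht'⟩; cases ht'; exact hc rfl)]
      simp only [boldList, List.filter_cons, ih2]
      simp [hc]

-- ===== VERDICT (by name: the statement is the Claim_ definition above) =====
theorem bold_spec : Claim_equal_bold := by
  intro string _
  unfold Spec_bold
  apply String.toList_inj.mp
  rw [bold, bold_loop, bold_alt]
  simp only [PySem.Str.replace, String.toList_ofList]
  rw [show ("**" : String).toList = ['*', '*'] from rfl,
      show ("'''" : String).toList = ['\'', '\'', '\''] from rfl,
      show ("*" : String).toList = ['*'] from rfl,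
      show ("" : String).toList = [] from rfl,
      replace_rep2, replace_filter, filter_rep2]
  rfl
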